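-- pv_equiv track=rewrite | github.com/wittmaan/AdventOfCode2023 | python/day15.py | sum_of_results
-- ===== SOURCE A (Python) =====
-- from collections import defaultdict
--
-- DASH = "-"
--
-- EQUALS_SIGN = "="
--
-- def hash_algorithm(input_string: str) -> int:
--     current_value = 0
--     for char in input_string:
--         ascii_code = ord(char)
--         current_value += ascii_code
--         current_value *= 17
--         current_value %= 256
--     return current_value
--
-- def sum_of_results(initialization_sequence, mode: str = "part1"):
--     steps = initialization_sequence.split(",")
--     boxes = defaultdict(dict)
--
--     for step in steps:
--         operation_char = DASH if DASH in step else EQUALS_SIGN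
--         label, focal_length = step.split(operation_char)
--         box = hash_algorithm(label)
--
--         if operation_char == DASH:
--             if label in boxes[box]:
--                 del boxes[box][label]
--         else:
--             boxes[box][label] = int(focal_length)
--
--     if mode == "part1":
--         total_sum = sum(hash_algorithm(step) for step in steps)
--         return total_sum
--     else:
--         result = sum(
--             (box_num + 1) * (lens_index + 1) * focal_length
--             for box_num, lenses in boxes.items()
--             for lens_index, focal_length in enumerate(lenses.values())
--         )
--         return result
-- ===== SOURCE B (Python) =====
-- DASH = "-"
--
-- EQUALS_SIGN = "="
--
-- def hash_algorithm(input_string: str) -> int: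
--     current_value = 0
--     for char in input_string:
--         current_value = (current_value + ord(char)) * 17 % 256
--     return current_value
--
-- def sum_of_results(initialization_sequence, mode: str = "part1"):
--     steps = initialization_sequence.split(",")
--     if mode == "part1":
--         return sum(hash_algorithm(step) for step in steps)
--     # Non-simulating algorithm for part 2: instead of replaying the box
--     # mutations, characterise the final configuration directly.
--     # A lens `label` survives iff some '=' step for it comes after its last
--     # '-' step; its focal length is the one of its LAST '=' step, and its
--     # slot order is given by its FIRST '=' step after its last '-' step.
--     parsed = []
--     for step in steps:
--         if DASH in step:
--             label, _ = step.split(DASH)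
--             parsed.append((label, None))
--         else:
--             label, focal = step.split(EQUALS_SIGN)
--             parsed.append((label, int(focal)))
--     last_dash = {}
--     last_focal = {}
--     for i, (label, focal) in enumerate(parsed):
--         if focal is None:
--             last_dash[label] = i
--         else:
--             last_focal[label] = focal
--     order = []
--     placed = set()
--     for i, (label, focal) in enumerate(parsed):
--         if focal is not None and i > last_dash.get(label, -1) and label not in placed:
--             placed.add(label)
--             order.append(label)
--     total = 0
--     slots = [0] * 256
--     for label in order:
--         box = hash_algorithm(label)
--         slots[box] += 1
--         total += (box + 1) * slots[box] * last_focal[label]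
--     return total
-- ===== Notes on version B (the rewrite author's own statement) =====
-- stated objective: alternative
-- what changed: A replays every box mutation in a defaultdict-of-dicts and only then sums; B never simulates the boxes: it characterises the final configuration directly (a lens survives iff an '=' step for its label follows the label's last '-' step, its focal length is that of its last '=' step, its slot position is its first surviving '=' step) via staged passes over the step list, and answers part1 straight from the hash sum without any box state.
-- outside the precondition, e.g. on sum_of_results('=', 'part1'): A raises ValueError, B returns 13
import Mathlib
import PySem

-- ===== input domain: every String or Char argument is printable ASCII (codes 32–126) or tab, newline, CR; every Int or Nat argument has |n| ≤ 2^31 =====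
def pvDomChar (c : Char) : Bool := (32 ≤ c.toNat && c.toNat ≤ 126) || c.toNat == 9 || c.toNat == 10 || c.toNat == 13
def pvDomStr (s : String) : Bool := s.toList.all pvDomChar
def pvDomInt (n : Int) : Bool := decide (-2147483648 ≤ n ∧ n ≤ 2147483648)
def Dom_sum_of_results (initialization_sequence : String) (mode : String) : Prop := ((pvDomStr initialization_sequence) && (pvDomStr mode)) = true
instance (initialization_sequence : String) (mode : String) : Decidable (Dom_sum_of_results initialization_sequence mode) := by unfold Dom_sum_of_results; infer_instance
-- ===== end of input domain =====

-- B does not replay A's box mutations at all: it characterises the final lens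
-- configuration directly (a lens survives iff an '=' step for its label follows the
-- label's last '-' step; focal = last '=' value; slot order = first surviving '='),
-- via staged passes (last-dash/last-focal dicts, placement pass, slot counters);
-- part1 is answered straight from the hash sum without any box state.

-- ===== PORT A =====
-- hash_algorithm (helper of both Python versions)
def pvHash (cs : List Char) : Int :=
  cs.foldl (fun cur c => PySem.Int.mod ((cur + (c.toNat : Int)) * 17) 256) 0

-- one iteration of A's `for step in steps` loop (none = the Python raises there)
def pvStepA (boxes : PySem.Dict Int (PySem.Dict (List Char) Int)) (step : List Char) :
    Option (PySem.Dict Int (PySem.Dict (List Char) Int)) :=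
  let op : List Char := if PySem.Chars.isIn ['-'] step then ['-'] else ['=']
  match PySem.Chars.splitOn step op with
  | [label, focal] =>
    let box := pvHash label
    if op == ['-'] then
      -- `if label in boxes[box]: del boxes[box][label]` (defaultdict access creates the entry)
      let inner := boxes.getD box PySem.Dict.empty
      some (boxes.insert box (if inner.contains label then inner.erase label else inner))
    else
      -- `boxes[box][label] = int(focal_length)`
      match PySem.Int.ofChars? focal with
      | some v =>
        let inner := boxes.getD box PySem.Dict.empty
        some (boxes.insert box (inner.insert label v))
      | none => none
  | _ => none   -- tuple unpacking of split fails: ValueError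

def sum_of_results (initialization_sequence : String) (mode : String) : Int :=
  let steps := PySem.Chars.splitOn initialization_sequence.toList [',']
  match steps.foldl (fun acc step => acc.bind (fun b => pvStepA b step))
      (some PySem.Dict.empty) with
  | none => 0   -- the Python raises; unreachable under Pre_
  | some boxes =>
    if mode == "part1" then
      (steps.map pvHash).sum
    else
      (boxes.items.map (fun bl =>
        ((PySem.List.enumerate bl.2.values).map
          (fun p => (bl.1 + 1) * (p.1 + 1) * p.2)).sum)).sum

-- ===== PORT B =====
-- parse one step into (label, Some focal | None) (none = the Python raises there)
def pvParse (step : List Char) : Option (List Char × Option Int) :=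
  if PySem.Chars.isIn ['-'] step then
    match PySem.Chars.splitOn step ['-'] with
    | [label, _] => some (label, none)
    | _ => none
  else
    match PySem.Chars.splitOn step ['='] with
    | [label, focal] => (PySem.Int.ofChars? focal).map (fun v => (label, some v))
    | _ => none

-- B's pass 1: the `last_dash` and `last_focal` dicts, built in one enumerate loop
def pvPass1 (parsed : List (List Char × Option Int)) :
    PySem.Dict (List Char) Int × PySem.Dict (List Char) Int :=
  (PySem.List.enumerate parsed).foldl
    (fun st p =>
      match p.2.2 with
      | none => (st.1.insert p.2.1 p.1, st.2)
      | some f => (st.1, st.2.insert p.2.1 f))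
    (PySem.Dict.empty, PySem.Dict.empty)

-- B's pass 2: placement order (first '=' after the label's last '-'), with the `placed` set
def pvPass2 (parsed : List (List Char × Option Int)) (lastDash : PySem.Dict (List Char) Int) :
    List (List Char) × PySem.Set (List Char) :=
  (PySem.List.enumerate parsed).foldl
    (fun st p =>
      if p.2.2.isSome ∧ p.1 > lastDash.getD p.2.1 (-1) ∧
          ¬ (PySem.Set.contains st.2 p.2.1 = true) then
        (st.1 ++ [p.2.1], PySem.Set.add st.2 p.2.1)
      else st)
    ([], PySem.Set.empty)

-- B's scoring loop over `order` with the 256 slot counters.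
-- `lastFocal.getD l 0`: every label of `order` has an '=' step, so it was recorded in
-- `last_focal` and Python's `last_focal[label]` never raises KeyError.
def pvScore (order : List (List Char)) (lastFocal : PySem.Dict (List Char) Int) : Int :=
  (order.foldl
    (fun st l =>
      let box := pvHash l
      let cnt := PySem.List.pyGetD st.1 box 0 + 1
      (PySem.List.pySetD st.1 box cnt, st.2 + (box + 1) * cnt * lastFocal.getD l 0))
    ((PySem.List.pyRange 0 256 1).map (fun _ => (0 : Int)), 0)).2

def sum_of_results_alt (initialization_sequence : String) (mode : String) : Int :=
  let steps := PySem.Chars.splitOn initialization_sequence.toList [',']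
  if mode == "part1" then
    (steps.map pvHash).sum
  else
    match steps.mapM pvParse with
    | none => 0   -- the Python raises; unreachable under Pre_
    | some parsed =>
      let dicts := pvPass1 parsed
      pvScore (pvPass2 parsed dicts.1).1 dicts.2

-- ===== PRECONDITION & SPEC =====
-- a step the Python accepts: splitting on the chosen operation char yields exactly two pieces,
-- and on '=' the focal-length piece parses as an int
def pvStepOK (step : List Char) : Bool :=
  if PySem.Chars.isIn ['-'] step then
    (PySem.Chars.splitOn step ['-']).length == 2
  else
    ((PySem.Chars.splitOn step ['=']).length == 2) &&
      (PySem.Int.ofChars? ((PySem.Chars.splitOn step ['=']).getD 1 [])).isSome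

-- Pre_ excludes exactly the inputs where A raises ValueError (a step with several operation
-- chars or none, or a non-int focal length after '=').
def Pre_sum_of_results (initialization_sequence : String) (mode : String) : Prop :=
  ∀ step ∈ PySem.Chars.splitOn initialization_sequence.toList [','], pvStepOK step = true

instance (initialization_sequence : String) (mode : String) :
    Decidable (Pre_sum_of_results initialization_sequence mode) := by
  unfold Pre_sum_of_results; infer_instance

def pvWitness_sum_of_results : String × String := ("rn=1,cm-", "part2")

def Spec_sum_of_results (initialization_sequence : String) (mode : String) (out : Int) : Prop :=
  out = sum_of_results_alt initialization_sequence mode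
instance (initialization_sequence : String) (mode : String) (out : Int) :
    Decidable (Spec_sum_of_results initialization_sequence mode out) := by
  unfold Spec_sum_of_results; infer_instance

-- ===== CLAIM (what is proved, stated in full; the proofs are below) =====
def Claim_equal_sum_of_results : Prop := ∀ (initialization_sequence : String) (mode : String), Dom_sum_of_results initialization_sequence mode → Pre_sum_of_results initialization_sequence mode → Spec_sum_of_results initialization_sequence mode (sum_of_results initialization_sequence mode)

-- ===== LEMMAS AND PROOFS =====

-- ---- the shared model: the final lens configuration as an ordered (label, focal) list ----

-- replace the first pair carrying the label, else append
def pvReplaceFirst (m : List (List Char × Int)) (label : List Char) (v : Int) :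
    List (List Char × Int) :=
  match m with
  | [] => [(label, v)]
  | p :: rest => if p.1 == label then (label, v) :: rest else p :: pvReplaceFirst rest label v

def pvApply (m : List (List Char × Int)) (op : List Char × Option Int) :
    List (List Char × Int) :=
  match op.2 with
  | none => m.filter (fun p => !(p.1 == op.1))
  | some v => pvReplaceFirst m op.1 v

def pvM (ops : List (List Char × Option Int)) : List (List Char × Int) :=
  ops.foldl pvApply []

-- proof-side views of B's passes, as folds over an already-enumerated list
def pvDashGo (ps : List (Int × (List Char × Option Int))) (d : PySem.Dict (List Char) Int) :
    PySem.Dict (List Char) Int :=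
  ps.foldl (fun d p => match p.2.2 with | none => d.insert p.2.1 p.1 | some _ => d) d

def pvFocalGo (ps : List (Int × (List Char × Option Int))) (d : PySem.Dict (List Char) Int) :
    PySem.Dict (List Char) Int :=
  ps.foldl (fun d p => match p.2.2 with | none => d | some f => d.insert p.2.1 f) d

def pvOMGo (D : PySem.Dict (List Char) Int) (acc : List (List Char))
    (ps : List (Int × (List Char × Option Int))) : List (List Char) :=
  ps.foldl (fun o p =>
    if p.2.2.isSome ∧ p.1 > D.getD p.2.1 (-1) ∧ ¬ (o.contains p.2.1 = true) then
      o ++ [p.2.1]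
    else o) acc

def pvDashF (ops : List (List Char × Option Int)) : PySem.Dict (List Char) Int :=
  pvDashGo (PySem.List.enumerate ops) PySem.Dict.empty
def pvFocalF (ops : List (List Char × Option Int)) : PySem.Dict (List Char) Int :=
  pvFocalGo (PySem.List.enumerate ops) PySem.Dict.empty
def pvOM (ops : List (List Char × Option Int)) (D : PySem.Dict (List Char) Int) :
    List (List Char) :=
  pvOMGo D [] (PySem.List.enumerate ops)

def pvPair (F : PySem.Dict (List Char) Int) : List Char → List Char × Int :=
  fun l => (l, F.getD l 0)

-- per-box focusing-power partial sum, with explicit enumerate start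
def pvG (b s : Int) (l : List (List Char × Int)) : Int :=
  ((PySem.List.enumerate l s).map (fun q => (b + 1) * (q.1 + 1) * q.2.2)).sum

-- ---- basic facts ----

theorem pvHash_aux (cs : List Char) : ∀ cur : Int, 0 ≤ cur → cur < 256 →
    0 ≤ cs.foldl (fun cur c => PySem.Int.mod ((cur + (c.toNat : Int)) * 17) 256) cur ∧
    cs.foldl (fun cur c => PySem.Int.mod ((cur + (c.toNat : Int)) * 17) 256) cur < 256 := by
  induction cs with
  | nil => exact fun cur h0 h1 => ⟨h0, h1⟩
  | cons c t ih =>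
    intro cur h0 h1
    exact ih _ (PySem.Int.mod_nonneg _ (by norm_num)) (PySem.Int.mod_lt _ (by norm_num))

theorem pvHash_bounds (cs : List Char) : 0 ≤ pvHash cs ∧ pvHash cs < 256 :=
  pvHash_aux cs 0 le_rfl (by norm_num)

theorem pvReplaceFirst_eq (l : List (List Char × Int)) (label : List Char) (v : Int)
    (h : (l.map Prod.fst).Nodup) :
    pvReplaceFirst l label v =
      if l.any (fun p => p.1 == label) then
        l.map (fun p => if p.1 == label then (label, v) else p)
      else l ++ [(label, v)] := by
  induction l with
  | nil => simp [pvReplaceFirst]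
  | cons p rest ih =>
    simp only [List.map_cons, List.nodup_cons] at h
    by_cases hp : (p.1 == label) = true
    · have hlab : p.1 = label := by simpa using hp
      have hz : ∀ q ∈ rest, (q.1 == label) = false := by
        intro q hq
        by_contra hc
        simp only [Bool.not_eq_false, beq_iff_eq] at hc
        exact h.1 (by rw [hlab, ← hc]; exact List.mem_map_of_mem hq)
      have hrw : pvReplaceFirst (p :: rest) label v = (label, v) :: rest := by
        simp [pvReplaceFirst, hp]
      rw [hrw, if_pos (by simp [hp]), List.map_cons, hp, if_pos rfl]
      congr 1
      exact (calc rest.map (fun q => if (q.1 == label) = true then (label, v) else q)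
          = rest.map id := List.map_congr_left (fun q hq => by simp [hz q hq])
        _ = rest := List.map_id _).symm
    · simp only [pvReplaceFirst, hp, List.any_cons, Bool.false_or]
      rw [ih h.2]
      by_cases ha : rest.any (fun p => p.1 == label) = true
      · simp only [ha, if_true, List.map_cons, hp, if_false]
        simp
      · simp only [Bool.not_eq_true] at ha
        simp [ha, hp]

-- ---- relating A's dict-of-dicts simulation to the model ----

def pvInner (d : PySem.Dict Int (PySem.Dict (List Char) Int)) (b : Int) :
    PySem.Dict (List Char) Int :=
  (d.get? b).getD PySem.Dict.empty

def pvRelA (dA : PySem.Dict Int (PySem.Dict (List Char) Int))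
    (m : List (List Char × Int)) : Prop :=
  dA.keys.Nodup ∧ (∀ k ∈ dA.keys, 0 ≤ k ∧ k < 256) ∧ (m.map Prod.fst).Nodup ∧
  (∀ b : Int, (pvInner dA b).items = m.filter (fun p => pvHash p.1 == b))

theorem pvRelA_init : pvRelA PySem.Dict.empty [] := by
  refine ⟨by simp [PySem.Dict.keys, PySem.Dict.empty], by simp [PySem.Dict.keys, PySem.Dict.empty], by simp, ?_⟩
  intro b
  simp [pvInner, PySem.Dict.empty, PySem.Dict.get?, PySem.Dict.items]

theorem pv_filter_swap {α : Type} (l : List α) (p q : α → Bool) :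
    (l.filter p).filter q = (l.filter q).filter p := by
  rw [List.filter_filter, List.filter_filter]
  exact List.filter_congr (fun x _ => Bool.and_comm _ _)

theorem pvStepRelA (step : List Char) (dA : PySem.Dict Int (PySem.Dict (List Char) Int))
    (m : List (List Char × Int)) (hok : pvStepOK step = true) (hrel : pvRelA dA m) :
    ∃ op dA', pvParse step = some op ∧ pvStepA dA step = some dA' ∧
      pvRelA dA' (pvApply m op) := by
  obtain ⟨hnd, hbnd, hmnd, hitems⟩ := hrel
  by_cases hdash : PySem.Chars.isIn ['-'] step = true
  · -- removal step
    rw [pvStepOK, if_pos hdash] at hok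
    replace hok : (PySem.Chars.splitOn step ['-']).length = 2 := by simpa using hok
    match hsp : PySem.Chars.splitOn step ['-'], hok' : hok with
    | [label, focal], _ =>
    obtain ⟨hb0, hb1⟩ := pvHash_bounds label
    set inner := dA.getD (pvHash label) PySem.Dict.empty with hinner
    have hIn : inner.items = m.filter (fun p => pvHash p.1 == pvHash label) := by
      rw [hinner, PySem.Dict.getD_eq_get?_getD]
      exact hitems _
    have hAp : pvApply m (label, none) = m.filter (fun p => !(p.1 == label)) := rfl
    refine ⟨(label, none),
      dA.insert (pvHash label) (if inner.contains label then inner.erase label else inner),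
      ?_, ?_, ?_⟩
    · simp [pvParse, hdash, hsp]
    · simp [pvStepA, hdash, hsp]
      rfl
    · rw [hAp]
      refine ⟨PySem.Dict.nodup_keys_insert _ _ _ hnd, ?_, ?_, ?_⟩
      · intro k hk
        rcases (PySem.Dict.mem_keys_insert _ _ _ _).mp hk with rfl | hk'
        · exact ⟨hb0, hb1⟩
        · exact hbnd k hk'
      · exact (List.filter_sublist.map Prod.fst).nodup hmnd
      · intro b
        unfold pvInner
        rw [PySem.Dict.get?_insert]
        by_cases hb : b = pvHash label
        · rw [if_pos hb, Option.getD_some]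
          subst hb
          by_cases hcont : inner.contains label = true
          · rw [if_pos hcont]
            have herase : (inner.erase label).items =
                inner.items.filter (fun p => !(p.1 == label)) := rfl
            rw [herase, hIn, pv_filter_swap]
          · rw [if_neg hcont]
            rw [pv_filter_swap, ← hIn]
            have hall : ∀ p ∈ inner.items, (!(p.1 == label)) = true := by
              intro p hp
              by_contra hc
              have hpl : p.1 = label := by simpa using hc
              have hkey : label ∈ inner.keys :=
                hpl ▸ List.mem_map_of_mem hp
              exact hcont ((PySem.Dict.contains_iff_mem_keys _ _).mpr hkey)
            exact (List.filter_eq_self.mpr hall).symm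
        · rw [if_neg hb]
          have hIb := hitems b
          unfold pvInner at hIb
          rw [hIb, pv_filter_swap]
          have hall : ∀ p ∈ m.filter (fun q => pvHash q.1 == b), (!(p.1 == label)) = true := by
            intro p hp
            rw [List.mem_filter] at hp
            have hpb : pvHash p.1 = b := by simpa using hp.2
            by_contra hc
            have hpl : p.1 = label := by simpa using hc
            exact hb (by rw [← hpb, hpl])
          exact (List.filter_eq_self.mpr hall).symm
  · -- assignment step
    rw [pvStepOK, if_neg hdash] at hok
    replace hok : (PySem.Chars.splitOn step ['=']).length = 2 ∧
        (PySem.Int.ofChars? ((PySem.Chars.splitOn step ['=']).getD 1 [])).isSome = true := by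
      simpa using hok
    match hsp : PySem.Chars.splitOn step ['='], hok1 : hok.1 with
    | [label, focal], _ =>
    have hparse := hok.2
    rw [hsp] at hparse
    clear hok1
    simp only [List.getD_cons_succ, List.getD_cons_zero, Option.isSome_iff_exists] at hparse
    obtain ⟨v, hv⟩ := hparse
    obtain ⟨hb0, hb1⟩ := pvHash_bounds label
    set inner := dA.getD (pvHash label) PySem.Dict.empty with hinner
    have hIn : inner.items = m.filter (fun p => pvHash p.1 == pvHash label) := by
      rw [hinner, PySem.Dict.getD_eq_get?_getD]
      exact hitems _
    have hAp : pvApply m (label, some v) = pvReplaceFirst m label v := rfl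
    have hconKey : inner.contains label = true ↔ label ∈ m.map Prod.fst := by
      rw [PySem.Dict.contains_iff_mem_keys]
      constructor
      · intro hkm
        have hkm' : label ∈ inner.items.map (fun x => x.1) := hkm
        rw [List.mem_map] at hkm'
        obtain ⟨p, hp, hpl⟩ := hkm'
        rw [hIn, List.mem_filter] at hp
        exact hpl ▸ List.mem_map_of_mem hp.1
      · intro hlm
        rw [List.mem_map] at hlm
        obtain ⟨p, hp, hpl⟩ := hlm
        have hpf : p ∈ m.filter (fun q => pvHash q.1 == pvHash label) := by
          rw [List.mem_filter]
          exact ⟨hp, by rw [beq_iff_eq, hpl]⟩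
        have hmm : p.1 ∈ inner.items.map (fun x => x.1) := by
          rw [hIn]
          exact List.mem_map_of_mem hpf
        exact hpl ▸ hmm
    have hany_iff : (m.any (fun p => p.1 == label) = true) ↔ label ∈ m.map Prod.fst := by
      rw [List.any_eq_true]
      constructor
      · rintro ⟨p, hp, hpe⟩
        exact (beq_iff_eq.mp hpe) ▸ List.mem_map_of_mem hp
      · intro h
        rw [List.mem_map] at h
        obtain ⟨p, hp, hpl⟩ := h
        exact ⟨p, hp, by rw [beq_iff_eq]; exact hpl⟩
    refine ⟨(label, some v), dA.insert (pvHash label) (inner.insert label v), ?_, ?_, ?_⟩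
    · simp [pvParse, hdash, hsp, hv]
    · simp [pvStepA, hdash, hsp, hv]
      rfl
    · rw [hAp]
      by_cases hmem : label ∈ m.map Prod.fst
      · -- overwrite in place
        have hcont : inner.contains label = true := hconKey.mpr hmem
        have hrw : pvReplaceFirst m label v =
            m.map (fun p => if p.1 == label then (label, v) else p) := by
          rw [pvReplaceFirst_eq m label v hmnd, if_pos (hany_iff.mpr hmem)]
        have howfst : (m.map (fun p => if p.1 == label then (label, v) else p)).map Prod.fst =
            m.map Prod.fst := by
          rw [List.map_map]
          apply List.map_congr_left
          intro p _
          by_cases hpl : (p.1 == label) = true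
          · simp only [Function.comp_def, hpl, if_true]
            exact (beq_iff_eq.mp hpl).symm
          · simp [Function.comp, hpl]
        refine ⟨PySem.Dict.nodup_keys_insert _ _ _ hnd, ?_, ?_, ?_⟩
        · intro k hk
          rcases (PySem.Dict.mem_keys_insert _ _ _ _).mp hk with rfl | hk'
          · exact ⟨hb0, hb1⟩
          · exact hbnd k hk'
        · rw [hrw, howfst]
          exact hmnd
        · intro b
          unfold pvInner
          rw [PySem.Dict.get?_insert]
          have hfcong : ∀ bb : Int,
              m.filter (fun p =>
                pvHash ((fun p => if p.1 == label then (label, v) else p) p).1 == bb) =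
              m.filter (fun p => pvHash p.1 == bb) := by
            intro bb
            apply List.filter_congr
            intro p _
            by_cases hpl : (p.1 == label) = true
            · simp only [hpl, if_true]
              rw [beq_iff_eq.mp hpl]
            · simp [hpl]
          by_cases hb : b = pvHash label
          · rw [if_pos hb, Option.getD_some]
            rw [PySem.Dict.items_insert_of_contains _ _ hcont, hIn, hrw, List.filter_map]
            rw [show ((fun p : List Char × Int => pvHash p.1 == b) ∘
                (fun p => if p.1 == label then (label, v) else p)) =
                (fun p => pvHash ((fun p : List Char × Int =>
                  if p.1 == label then (label, v) else p) p).1 == b) from rfl]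
            rw [hfcong b, hb]
          · rw [if_neg hb]
            have hIb := hitems b
            unfold pvInner at hIb
            rw [hIb, hrw, List.filter_map]
            rw [show ((fun p : List Char × Int => pvHash p.1 == b) ∘
                (fun p => if p.1 == label then (label, v) else p)) =
                (fun p => pvHash ((fun p : List Char × Int =>
                  if p.1 == label then (label, v) else p) p).1 == b) from rfl]
            rw [hfcong b]
            have : (m.filter (fun p => pvHash p.1 == b)).map
                (fun p => if p.1 == label then (label, v) else p) =
                m.filter (fun p => pvHash p.1 == b) := by
              have hid : ∀ p ∈ m.filter (fun q => pvHash q.1 == b),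
                  (if p.1 == label then (label, v) else p) = p := by
                intro p hp
                rw [List.mem_filter] at hp
                have hpb : pvHash p.1 = b := by simpa using hp.2
                have hpl : (p.1 == label) = false := by
                  rw [beq_eq_false_iff_ne]
                  intro hc
                  exact hb (by rw [← hpb, hc])
                rw [hpl]
                simp
              exact (List.map_congr_left hid).trans (List.map_id _)
            rw [this]
      · -- append at the end
        have hcont : inner.contains label = false := by
          cases hcb : inner.contains label
          · rfl
          · exact absurd (hconKey.mp hcb) hmem
        have hrw : pvReplaceFirst m label v = m ++ [(label, v)] := by
          rw [pvReplaceFirst_eq m label v hmnd,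
            if_neg (fun hc => hmem (hany_iff.mp hc))]
        refine ⟨PySem.Dict.nodup_keys_insert _ _ _ hnd, ?_, ?_, ?_⟩
        · intro k hk
          rcases (PySem.Dict.mem_keys_insert _ _ _ _).mp hk with rfl | hk'
          · exact ⟨hb0, hb1⟩
          · exact hbnd k hk'
        · rw [hrw, List.map_append, List.nodup_append]
          refine ⟨hmnd, List.nodup_singleton _, ?_⟩
          intro a ha b hb
          have hb' : b = label := by simpa using hb
          subst hb'
          exact fun h => hmem (h ▸ ha)
        · intro b
          unfold pvInner
          rw [PySem.Dict.get?_insert]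
          by_cases hb : b = pvHash label
          · rw [if_pos hb, Option.getD_some]
            rw [PySem.Dict.items_insert_of_not_contains _ _ hcont, hIn, hrw,
              List.filter_append]
            congr 1
            · rw [hb]
            · simp [hb]
          · rw [if_neg hb]
            have hIb := hitems b
            unfold pvInner at hIb
            rw [hIb, hrw, List.filter_append]
            have hone : [((label : List Char), v)].filter (fun p => pvHash p.1 == b) = [] := by
              simp only [List.filter_cons, List.filter_nil]
              rw [if_neg (by
                rw [beq_iff_eq]
                exact fun h => hb h.symm)]
            rw [hone, List.append_nil]

theorem pvFoldRelA (steps : List (List Char)) :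
    ∀ (dA : PySem.Dict Int (PySem.Dict (List Char) Int)) (m : List (List Char × Int)),
    (∀ s ∈ steps, pvStepOK s = true) → pvRelA dA m →
    ∃ parsed dA',
      steps.mapM pvParse = some parsed ∧
      steps.foldl (fun acc step => acc.bind (fun b => pvStepA b step)) (some dA) = some dA' ∧
      pvRelA dA' (parsed.foldl pvApply m) := by
  induction steps with
  | nil => exact fun dA m _ hrel => ⟨[], dA, rfl, rfl, hrel⟩
  | cons s t ih =>
    intro dA m hok hrel
    obtain ⟨op, dA1, hp, hA1, hrel1⟩ := pvStepRelA s dA m (hok s (by simp)) hrel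
    obtain ⟨pt, dA', hmt, hA', hrel'⟩ := ih dA1 (pvApply m op)
      (fun x hx => hok x (by simp [hx])) hrel1
    exact ⟨op :: pt, dA', by simp [List.mapM_cons, hp, hmt], by simpa [hA1] using hA', hrel'⟩

-- ---- A's part-2 sum from the model ----

theorem pv_sum_filter_zero {α : Type} (l : List α) (p : α → Bool) (f : α → Int)
    (h : ∀ x ∈ l, p x = false → f x = 0) :
    (l.map f).sum = ((l.filter p).map f).sum := by
  induction l with
  | nil => rfl
  | cons x t ih =>
    by_cases hp : p x = true
    · simp [List.filter_cons, hp, ih (fun y hy => h y (by simp [hy]))]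
    · simp only [Bool.not_eq_true] at hp
      simp [List.filter_cons, hp, h x (by simp) hp, ih (fun y hy => h y (by simp [hy]))]

theorem pv_sum_keys_range (keys : List Int) (F : Int → Int) (N : Nat)
    (hnd : keys.Nodup) (hb : ∀ k ∈ keys, 0 ≤ k ∧ k < (N : Int))
    (hz : ∀ n : Nat, n < N → (↑n ∉ keys) → F ↑n = 0) :
    ((List.range N).map (fun (n : Nat) => F (n : Int))).sum = (keys.map F).sum := by
  rw [pv_sum_filter_zero (List.range N) (fun (n : Nat) => decide ((n : Int) ∈ keys)) _
    (fun n hn hd => hz n (by simpa using hn) (by simpa using hd))]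
  rw [show ((List.range N).filter (fun (n : Nat) => decide ((n : Int) ∈ keys))).map (fun (n : Nat) => F (n : Int))
      = (((List.range N).filter (fun (n : Nat) => decide ((n : Int) ∈ keys))).map (fun (n : Nat) => (n : Int))).map F by
    rw [List.map_map]; rfl]
  have hperm : (((List.range N).filter (fun (n : Nat) => decide ((n : Int) ∈ keys))).map (fun (n : Nat) => (n : Int))).Perm keys := by
    rw [List.perm_ext_iff_of_nodup ?_ hnd]
    · intro a
      simp only [List.mem_map, List.mem_filter, List.mem_range, decide_eq_true_eq]
      constructor
      · rintro ⟨n, ⟨_, hm⟩, rfl⟩; exact hm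
      · intro ha
        obtain ⟨h0, h1⟩ := hb a ha
        exact ⟨a.toNat, ⟨by omega, by simpa [Int.toNat_of_nonneg h0] using ha⟩, by omega⟩
    · exact ((List.nodup_range).filter _).map (fun x y => by omega)
  exact (hperm.map F).sum_eq

theorem pv_enumerate_map {α β : Type} (l : List α) (f : α → β) (s : Int) :
    PySem.List.enumerate (l.map f) s =
      (PySem.List.enumerate l s).map (fun q => (q.1, f q.2)) := by
  induction l generalizing s with
  | nil => simp [PySem.List.enumerate]
  | cons x t ih => simp [PySem.List.enumerate, ih]

-- A's items-sum equals the range-256 sum of per-box focusing powers of the model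
theorem pvSumA (dA : PySem.Dict Int (PySem.Dict (List Char) Int))
    (m : List (List Char × Int)) (hrel : pvRelA dA m) :
    (dA.items.map (fun bl =>
      ((PySem.List.enumerate bl.2.values).map
        (fun p => (bl.1 + 1) * (p.1 + 1) * p.2)).sum)).sum =
    ((List.range 256).map (fun (n : Nat) =>
      pvG (n : Int) 0 (m.filter (fun p => pvHash p.1 == (n : Int))))).sum := by
  obtain ⟨hnd, hbnd, hmnd, hitems⟩ := hrel
  have hz : ∀ n : Nat, n < 256 → ((n : Int) ∉ dA.keys) →
      pvG ((n : Nat) : Int) 0 (m.filter (fun p => pvHash p.1 == ((n : Nat) : Int))) = 0 := by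
    intro n _ hnm
    have hfil : m.filter (fun p => pvHash p.1 == ((n : Nat) : Int)) = [] := by
      rw [← hitems ((n : Nat) : Int)]
      unfold pvInner
      rw [(PySem.Dict.get?_eq_none_iff_not_mem_keys _ _).mpr hnm]
      rfl
    rw [hfil]
    rfl
  calc (dA.items.map (fun bl =>
      ((PySem.List.enumerate bl.2.values).map
        (fun p => (bl.1 + 1) * (p.1 + 1) * p.2)).sum)).sum
      = (dA.keys.map (fun k => pvG k 0 (m.filter (fun p => pvHash p.1 == k)))).sum := by
        rw [PySem.Dict.items_eq_map_keys dA hnd PySem.Dict.empty, List.map_map]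
        refine congrArg List.sum (List.map_congr_left ?_)
        intro k hk
        have hI : (dA.getD k PySem.Dict.empty).items =
            m.filter (fun p => pvHash p.1 == k) := by
          rw [PySem.Dict.getD_eq_get?_getD]
          exact hitems k
        simp only [Function.comp_def]
        rw [show (dA.getD k PySem.Dict.empty).values
            = (dA.getD k PySem.Dict.empty).items.map Prod.snd from rfl,
          pv_enumerate_map, List.map_map, hI]
        rfl
    _ = ((List.range 256).map (fun (n : Nat) =>
          pvG (n : Int) 0 (m.filter (fun p => pvHash p.1 == (n : Int))))).sum :=
        (pv_sum_keys_range dA.keys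
          (fun k => pvG k 0 (m.filter (fun p => pvHash p.1 == k))) 256 hnd hbnd hz).symm

-- ---- B's staged passes compute the model ----

theorem pvPass1_go (ps : List (Int × (List Char × Option Int))) :
    ∀ (d1 d2 : PySem.Dict (List Char) Int),
    ps.foldl (fun st p =>
        match p.2.2 with
        | none => (st.1.insert p.2.1 p.1, st.2)
        | some f => (st.1, st.2.insert p.2.1 f)) (d1, d2) =
      (pvDashGo ps d1, pvFocalGo ps d2) := by
  induction ps with
  | nil => intro d1 d2; rfl
  | cons p t ih =>
    intro d1 d2
    cases hp : p.2.2 <;>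
      simp only [List.foldl_cons, pvDashGo, pvFocalGo, hp] <;>
      exact ih _ _

theorem pvPass1_eq (parsed : List (List Char × Option Int)) :
    pvPass1 parsed = (pvDashF parsed, pvFocalF parsed) := by
  unfold pvPass1 pvDashF pvFocalF pvDashGo pvFocalGo
  have := pvPass1_go (PySem.List.enumerate parsed) PySem.Dict.empty PySem.Dict.empty
  unfold pvDashGo pvFocalGo at this
  exact this

theorem pvPass2_go (D : PySem.Dict (List Char) Int)
    (ps : List (Int × (List Char × Option Int))) :
    ∀ (o : List (List Char)),
    ps.foldl (fun st p =>
        if p.2.2.isSome ∧ p.1 > D.getD p.2.1 (-1) ∧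
            ¬ (PySem.Set.contains st.2 p.2.1 = true) then
          (st.1 ++ [p.2.1], PySem.Set.add st.2 p.2.1)
        else st) (o, o) =
      (pvOMGo D o ps, pvOMGo D o ps) := by
  induction ps with
  | nil => intro o; rfl
  | cons p t ih =>
    intro o
    simp only [List.foldl_cons, pvOMGo, PySem.Set.contains]
    by_cases hc : p.2.2.isSome ∧ p.1 > D.getD p.2.1 (-1) ∧ ¬ (List.contains o p.2.1 = true)
    · rw [if_pos hc, if_pos hc]
      have hadd : PySem.Set.add o p.2.1 = o ++ [p.2.1] := by
        unfold PySem.Set.add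
        rw [if_neg (by exact hc.2.2)]
      rw [hadd]
      have := ih (o ++ [p.2.1])
      unfold pvOMGo at this
      exact this
    · rw [if_neg hc, if_neg hc]
      have := ih o
      unfold pvOMGo at this
      exact this

theorem pvPass2_eq (parsed : List (List Char × Option Int)) (D : PySem.Dict (List Char) Int) :
    (pvPass2 parsed D).1 = pvOM parsed D := by
  unfold pvPass2 pvOM
  rw [show (([] : List (List Char)), (PySem.Set.empty : PySem.Set (List Char)))
      = (([] : List (List Char)), ([] : List (List Char))) from rfl]
  rw [pvPass2_go D (PySem.List.enumerate parsed) []]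

-- values stored in the last-dash dict are indices of the list, hence < n
theorem pvDashGo_lt (ps : List (Int × (List Char × Option Int))) (n : Int) :
    ∀ (d : PySem.Dict (List Char) Int), (∀ p ∈ ps, p.1 < n) →
    (∀ l, d.getD l (-1) < n) → ∀ l, (pvDashGo ps d).getD l (-1) < n := by
  induction ps with
  | nil => exact fun d _ hd => hd
  | cons p t ih =>
    intro d hn hd l
    simp only [pvDashGo, List.foldl_cons]
    cases hp : p.2.2 with
    | none =>
      refine ih _ (fun q hq => hn q (by simp [hq])) (fun l' => ?_) l
      rw [PySem.Dict.getD_insert]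
      split
      · exact hn p (by simp)
      · exact hd l'
    | some f => exact ih _ (fun q hq => hn q (by simp [hq])) hd l

theorem pvDashF_lt (ops : List (List Char × Option Int)) (l : List Char) :
    (pvDashF ops).getD l (-1) < (ops.length : Int) := by
  refine pvDashGo_lt _ _ PySem.Dict.empty (fun p hp => ?_) (fun l' => ?_) l
  · rw [PySem.List.mem_enumerate_iff] at hp
    obtain ⟨k, hk, rfl⟩ := hp
    simp only [zero_add]
    exact_mod_cast hk
  · rw [PySem.Dict.getD_empty]
    have : (0 : Int) ≤ (ops.length : Int) := by positivity
    omega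

theorem pvOMGo_nodup (ps : List (Int × (List Char × Option Int)))
    (D : PySem.Dict (List Char) Int) :
    ∀ acc : List (List Char), acc.Nodup → (pvOMGo D acc ps).Nodup := by
  induction ps with
  | nil => exact fun acc h => h
  | cons p t ih =>
    intro acc hacc
    simp only [pvOMGo, List.foldl_cons]
    by_cases hc : p.2.2.isSome ∧ p.1 > D.getD p.2.1 (-1) ∧ ¬ (acc.contains p.2.1 = true)
    · rw [if_pos hc]
      refine ih _ ?_
      have hmem : p.2.1 ∉ acc := by
        have h2 := hc.2.2
        rw [List.contains_eq_mem] at h2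
        simpa using h2
      rw [List.nodup_append]
      refine ⟨hacc, List.nodup_singleton _, ?_⟩
      intro a ha b hb
      have hb' : b = p.2.1 := by simpa using hb
      subst hb'
      exact fun h => hmem (h ▸ ha)
    · rw [if_neg hc]; exact ih _ hacc

-- raising the last-dash entry of one label above every index filters that label out
theorem pvOMGo_insert_high (D : PySem.Dict (List Char) Int) (l : List Char) (n : Int) :
    ∀ (ps : List (Int × (List Char × Option Int))), (∀ p ∈ ps, p.1 < n) →
    ∀ acc : List (List Char),
      pvOMGo (D.insert l n) (acc.filter (fun x => !(x == l))) ps =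
        (pvOMGo D acc ps).filter (fun x => !(x == l)) := by
  intro ps
  induction ps with
  | nil => intro _ acc; rfl
  | cons p t ih =>
    intro hn acc
    have iht := ih (fun q hq => hn q (by simp [hq]))
    simp only [pvOMGo, List.foldl_cons]
    by_cases hs : p.2.2.isSome = true
    · by_cases hl : p.2.1 = l
      · have hg : (D.insert l n).getD p.2.1 (-1) = n := by
          rw [PySem.Dict.getD_insert, if_pos hl]
        have hplt : p.1 < n := hn p (by simp)
        rw [if_neg (fun hcc => by
          have h2 := hcc.2.1
          rw [hg] at h2
          omega)]
        by_cases hc : p.1 > D.getD p.2.1 (-1) ∧ ¬ (acc.contains p.2.1 = true)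
        · rw [if_pos ⟨hs, hc.1, hc.2⟩]
          have hfe : (acc ++ [p.2.1]).filter (fun x => !(x == l)) =
              acc.filter (fun x => !(x == l)) := by
            rw [List.filter_append]
            simp [hl]
          have h3 := iht (acc ++ [p.2.1])
          unfold pvOMGo at h3
          rw [hfe] at h3
          exact h3
        · rw [if_neg (fun hcc => hc ⟨hcc.2.1, hcc.2.2⟩)]
          have h3 := iht acc
          unfold pvOMGo at h3
          exact h3
      · have hg : (D.insert l n).getD p.2.1 (-1) = D.getD p.2.1 (-1) := by
          rw [PySem.Dict.getD_insert, if_neg hl]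
        have hmf : (acc.filter (fun x => !(x == l))).contains p.2.1 = acc.contains p.2.1 := by
          rw [List.contains_eq_mem, List.contains_eq_mem]
          simp [List.mem_filter, hl]
        by_cases hc : p.1 > D.getD p.2.1 (-1) ∧ ¬ (acc.contains p.2.1 = true)
        · rw [if_pos ⟨hs, by rw [hg]; exact hc.1, by rw [hmf]; exact hc.2⟩,
              if_pos ⟨hs, hc.1, hc.2⟩]
          have hfe : acc.filter (fun x => !(x == l)) ++ [p.2.1] =
              (acc ++ [p.2.1]).filter (fun x => !(x == l)) := by
            rw [List.filter_append]
            simp [hl]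
          rw [hfe]
          have h3 := iht (acc ++ [p.2.1])
          unfold pvOMGo at h3
          exact h3
        · rw [if_neg (fun hcc => hc ⟨by rw [← hg]; exact hcc.2.1, by rw [← hmf]; exact hcc.2.2⟩),
              if_neg (fun hcc => hc ⟨hcc.2.1, hcc.2.2⟩)]
          have h3 := iht acc
          unfold pvOMGo at h3
          exact h3
    · rw [if_neg (fun hcc => hs hcc.1), if_neg (fun hcc => hs hcc.1)]
      have h3 := iht acc
      unfold pvOMGo at h3
      exact h3

theorem pvM_append (ops : List (List Char × Option Int)) (op : List Char × Option Int) :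
    pvM (ops ++ [op]) = pvApply (pvM ops) op := by
  simp [pvM, List.foldl_append]

theorem pvDashF_append_none (ops : List (List Char × Option Int)) (l : List Char) :
    pvDashF (ops ++ [(l, none)]) = (pvDashF ops).insert l (ops.length : Int) := by
  unfold pvDashF pvDashGo
  rw [PySem.List.enumerate_append, List.foldl_append]
  simp [PySem.List.enumerate]

theorem pvDashF_append_some (ops : List (List Char × Option Int)) (l : List Char) (v : Int) :
    pvDashF (ops ++ [(l, some v)]) = pvDashF ops := by
  unfold pvDashF pvDashGo
  rw [PySem.List.enumerate_append, List.foldl_append]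
  simp [PySem.List.enumerate]

theorem pvFocalF_append_none (ops : List (List Char × Option Int)) (l : List Char) :
    pvFocalF (ops ++ [(l, none)]) = pvFocalF ops := by
  unfold pvFocalF pvFocalGo
  rw [PySem.List.enumerate_append, List.foldl_append]
  simp [PySem.List.enumerate]

theorem pvFocalF_append_some (ops : List (List Char × Option Int)) (l : List Char) (v : Int) :
    pvFocalF (ops ++ [(l, some v)]) = (pvFocalF ops).insert l v := by
  unfold pvFocalF pvFocalGo
  rw [PySem.List.enumerate_append, List.foldl_append]
  simp [PySem.List.enumerate]

theorem pvOM_append_none (ops : List (List Char × Option Int)) (l : List Char)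
    (D : PySem.Dict (List Char) Int) :
    pvOM (ops ++ [(l, none)]) D = pvOM ops D := by
  unfold pvOM pvOMGo
  rw [PySem.List.enumerate_append, List.foldl_append]
  simp [PySem.List.enumerate]

theorem pvOM_append_some (ops : List (List Char × Option Int)) (l : List Char) (v : Int)
    (D : PySem.Dict (List Char) Int) :
    pvOM (ops ++ [(l, some v)]) D =
      if (ops.length : Int) > D.getD l (-1) ∧ ¬ ((pvOM ops D).contains l = true) then
        pvOM ops D ++ [l]
      else pvOM ops D := by
  unfold pvOM pvOMGo
  rw [PySem.List.enumerate_append, List.foldl_append]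
  simp [PySem.List.enumerate]

-- MAIN: the staged passes produce exactly the model configuration
theorem pvM_eq (ops : List (List Char × Option Int)) :
    pvM ops = (pvOM ops (pvDashF ops)).map (pvPair (pvFocalF ops)) := by
  induction ops using List.reverseRecOn with
  | nil => rfl
  | append_singleton ops op ih =>
    obtain ⟨l, of⟩ := op
    cases of with
    | none =>
      rw [pvM_append, pvDashF_append_none, pvFocalF_append_none, pvOM_append_none]
      have hbound : ∀ p ∈ PySem.List.enumerate ops, p.1 < (ops.length : Int) := by
        intro p hp
        rw [PySem.List.mem_enumerate_iff] at hp
        obtain ⟨k, hk, rfl⟩ := hp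
        simp only [zero_add]
        exact_mod_cast hk
      have hOM : pvOM ops ((pvDashF ops).insert l (ops.length : Int)) =
          (pvOM ops (pvDashF ops)).filter (fun x => !(x == l)) := by
        have h := pvOMGo_insert_high (pvDashF ops) l (ops.length : Int)
          (PySem.List.enumerate ops) hbound []
        simpa [pvOM] using h
      rw [hOM, ih]
      show ((pvOM ops (pvDashF ops)).map (pvPair (pvFocalF ops))).filter
          (fun p => !(p.1 == l)) =
        ((pvOM ops (pvDashF ops)).filter (fun x => !(x == l))).map (pvPair (pvFocalF ops))
      rw [List.filter_map]
      rfl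
    | some v =>
      rw [pvM_append, pvDashF_append_some, pvFocalF_append_some, pvOM_append_some, ih]
      have hlt : (ops.length : Int) > (pvDashF ops).getD l (-1) := pvDashF_lt ops l
      have hnodup : (pvOM ops (pvDashF ops)).Nodup :=
        pvOMGo_nodup _ _ [] List.nodup_nil
      have hfst : ((pvOM ops (pvDashF ops)).map (pvPair (pvFocalF ops))).map Prod.fst =
          pvOM ops (pvDashF ops) := by
        rw [List.map_map]
        exact (List.map_congr_left (fun x _ => rfl)).trans (List.map_id _)
      by_cases hmem : l ∈ pvOM ops (pvDashF ops)
      · have hcont : (pvOM ops (pvDashF ops)).contains l = true := by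
          rw [List.contains_eq_mem]; simpa using hmem
        rw [if_neg (fun hcc => hcc.2 hcont)]
        show pvReplaceFirst ((pvOM ops (pvDashF ops)).map (pvPair (pvFocalF ops))) l v = _
        rw [pvReplaceFirst_eq _ _ _ (by rw [hfst]; exact hnodup)]
        have hany : ((pvOM ops (pvDashF ops)).map (pvPair (pvFocalF ops))).any
            (fun p => p.1 == l) = true := by
          rw [List.any_eq_true]
          exact ⟨pvPair (pvFocalF ops) l, List.mem_map_of_mem hmem, by simp [pvPair]⟩
        rw [if_pos hany, List.map_map]
        apply List.map_congr_left
        intro x hx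
        by_cases hxl : x = l
        · subst hxl
          simp [pvPair, PySem.Dict.getD_insert]
        · simp [pvPair, Function.comp, hxl, PySem.Dict.getD_insert]
      · have hcont : (pvOM ops (pvDashF ops)).contains l = false := by
          rw [List.contains_eq_mem]; simp [hmem]
        rw [if_pos ⟨hlt, by rw [hcont]; simp⟩]
        show pvReplaceFirst ((pvOM ops (pvDashF ops)).map (pvPair (pvFocalF ops))) l v = _
        rw [pvReplaceFirst_eq _ _ _ (by rw [hfst]; exact hnodup)]
        have hany : ((pvOM ops (pvDashF ops)).map (pvPair (pvFocalF ops))).any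
            (fun p => p.1 == l) = false := by
          rw [List.any_eq_false]
          intro p hp
          rw [List.mem_map] at hp
          obtain ⟨x, hx, rfl⟩ := hp
          simp only [pvPair, beq_iff_eq]
          exact fun h => hmem (h ▸ hx)
        rw [if_neg (by simp [hany]), List.map_append]
        congr 1
        · apply List.map_congr_left
          intro x hx
          have hxl : x ≠ l := fun h => hmem (h ▸ hx)
          simp [pvPair, PySem.Dict.getD_insert, hxl]
        · simp [pvPair, PySem.Dict.getD_insert]

-- ---- B's scoring loop computes the range-256 sum ----

theorem pvGetD_map_zero {α : Type} (l : List α) (i : Int) :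
    PySem.List.pyGetD (l.map (fun _ => (0 : Int))) i 0 = 0 := by
  unfold PySem.List.pyGetD
  cases h : PySem.List.pyGet? (l.map (fun _ => (0 : Int))) i with
  | none => rfl
  | some x =>
    have hx := PySem.List.mem_of_pyGet?_eq_some _ h
    simp only [List.mem_map] at hx
    obtain ⟨_, _, rfl⟩ := hx
    rfl

theorem pvG_cons (b s : Int) (p : List Char × Int) (r : List (List Char × Int)) :
    pvG b s (p :: r) = (b + 1) * (s + 1) * p.2 + pvG b (s + 1) r := by
  simp [pvG, PySem.List.enumerate]

theorem pv_sum_update (N : Nat) (F F' : Nat → Int) (n0 : Nat) (c : Int)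
    (h0 : n0 < N) (he : F n0 = c + F' n0) (ho : ∀ n, n ≠ n0 → F n = F' n) :
    ((List.range N).map F).sum = c + ((List.range N).map F').sum := by
  revert h0
  induction N with
  | zero => intro h0; omega
  | succ N ih =>
    intro h0
    rw [List.range_succ]
    simp only [List.map_append, List.sum_append, List.map_cons, List.map_nil,
      List.sum_cons, List.sum_nil]
    rcases Nat.lt_succ_iff_lt_or_eq.mp h0 with h | h
    · have := ih h
      have hN : F N = F' N := ho N (by omega)
      omega
    · subst h
      have hmap : (List.range n0).map F = (List.range n0).map F' :=
        List.map_congr_left (fun n hn => ho n (by simp at hn; omega))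
      rw [hmap]
      omega

theorem pvScore_gen (m : List (List Char × Int)) :
    ∀ (slots : List Int) (t : Int), slots.length = 256 →
    (m.foldl (fun st (p : List Char × Int) =>
        let box := pvHash p.1
        let cnt := PySem.List.pyGetD st.1 box 0 + 1
        (PySem.List.pySetD st.1 box cnt, st.2 + (box + 1) * cnt * p.2))
      (slots, t)).2 =
      t + ((List.range 256).map (fun (n : Nat) =>
        pvG (n : Int) (PySem.List.pyGetD slots (n : Int) 0)
          (m.filter (fun p => pvHash p.1 == (n : Int))))).sum := by
  induction m with
  | nil =>
    intro slots t hlen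
    simp only [List.foldl_nil, List.filter_nil]
    have hz : ((List.range 256).map (fun (n : Nat) =>
        pvG (n : Int) (PySem.List.pyGetD slots (n : Int) 0)
          ([] : List (List Char × Int)))).sum = 0 :=
      List.sum_eq_zero (fun x hx => by
        obtain ⟨n, _, rfl⟩ := List.mem_map.mp hx
        rfl)
    omega
  | cons p rest ih =>
    intro slots t hlen
    obtain ⟨hh0, hh1⟩ := pvHash_bounds p.1
    have hb0lt : (pvHash p.1).toNat < slots.length := by omega
    have hbox : pvHash p.1 = (((pvHash p.1).toNat : Nat) : Int) := by omega
    simp only [List.foldl_cons]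
    show (rest.foldl _
        (PySem.List.pySetD slots (pvHash p.1) (PySem.List.pyGetD slots (pvHash p.1) 0 + 1),
         t + (pvHash p.1 + 1) * (PySem.List.pyGetD slots (pvHash p.1) 0 + 1) * p.2)).2 = _
    rw [ih (PySem.List.pySetD slots (pvHash p.1) (PySem.List.pyGetD slots (pvHash p.1) 0 + 1))
        (t + (pvHash p.1 + 1) * (PySem.List.pyGetD slots (pvHash p.1) 0 + 1) * p.2)
        (by rw [PySem.List.length_pySetD]; exact hlen)]
    have hupd : ((List.range 256).map (fun (n : Nat) =>
        pvG (n : Int) (PySem.List.pyGetD slots (n : Int) 0)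
          ((p :: rest).filter (fun q => pvHash q.1 == (n : Int))))).sum =
        (pvHash p.1 + 1) * (PySem.List.pyGetD slots (pvHash p.1) 0 + 1) * p.2 +
        ((List.range 256).map (fun (n : Nat) =>
          pvG (n : Int)
            (PySem.List.pyGetD
              (PySem.List.pySetD slots (pvHash p.1) (PySem.List.pyGetD slots (pvHash p.1) 0 + 1))
              (n : Int) 0)
            (rest.filter (fun q => pvHash q.1 == (n : Int))))).sum := by
      refine pv_sum_update 256 _ _ (pvHash p.1).toNat _ (by omega) ?_ ?_
      · have hcast : (((pvHash p.1).toNat : Nat) : Int) = pvHash p.1 := hbox.symm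
        have h2 : PySem.List.pySetD slots (pvHash p.1)
              (PySem.List.pyGetD slots (pvHash p.1) 0 + 1) =
            PySem.List.pySetD slots (((pvHash p.1).toNat : Nat) : Int)
              (PySem.List.pyGetD slots (pvHash p.1) 0 + 1) := by
          rw [← hbox]
        have hget' : PySem.List.pyGetD
            (PySem.List.pySetD slots (pvHash p.1) (PySem.List.pyGetD slots (pvHash p.1) 0 + 1))
            (((pvHash p.1).toNat : Nat) : Int) 0 =
            PySem.List.pyGetD slots (pvHash p.1) 0 + 1 := by
          rw [h2, PySem.List.pyGetD_pySetD_natCast _ _ _ _ _ hb0lt, if_pos rfl]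
        rw [hget', hcast]
        simp only [List.filter_cons, beq_self_eq_true, if_true]
        rw [pvG_cons]
      · intro n hn
        have hne : ((n : Nat) : Int) ≠ pvHash p.1 := by omega
        have h2 : PySem.List.pySetD slots (pvHash p.1)
              (PySem.List.pyGetD slots (pvHash p.1) 0 + 1) =
            PySem.List.pySetD slots (((pvHash p.1).toNat : Nat) : Int)
              (PySem.List.pyGetD slots (pvHash p.1) 0 + 1) := by
          rw [← hbox]
        have hget' : PySem.List.pyGetD
            (PySem.List.pySetD slots (pvHash p.1) (PySem.List.pyGetD slots (pvHash p.1) 0 + 1))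
            ((n : Nat) : Int) 0 = PySem.List.pyGetD slots ((n : Nat) : Int) 0 := by
          rw [h2, PySem.List.pyGetD_pySetD_natCast _ _ _ _ _ hb0lt, if_neg hn]
        rw [hget']
        simp only [List.filter_cons]
        rw [if_neg (by
          rw [beq_iff_eq]
          exact fun hcc => hne hcc.symm)]
    rw [hupd]
    ring

theorem pvScore_eq (order : List (List Char)) (F : PySem.Dict (List Char) Int) :
    pvScore order F =
      ((List.range 256).map (fun (n : Nat) =>
        pvG (n : Int) 0
          ((order.map (pvPair F)).filter (fun p => pvHash p.1 == (n : Int))))).sum := by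
  have hfold :
      ((order.map (pvPair F)).foldl (fun st (p : List Char × Int) =>
          let box := pvHash p.1
          let cnt := PySem.List.pyGetD st.1 box 0 + 1
          (PySem.List.pySetD st.1 box cnt, st.2 + (box + 1) * cnt * p.2))
        ((PySem.List.pyRange 0 256 1).map (fun _ => (0 : Int)), 0)) =
      (order.foldl (fun st l =>
          let box := pvHash l
          let cnt := PySem.List.pyGetD st.1 box 0 + 1
          (PySem.List.pySetD st.1 box cnt, st.2 + (box + 1) * cnt * F.getD l 0))
        ((PySem.List.pyRange 0 256 1).map (fun _ => (0 : Int)), 0)) := by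
    rw [List.foldl_map]
    rfl
  unfold pvScore
  rw [← hfold, pvScore_gen _ _ _ (by
    rw [List.length_map, PySem.List.length_pyRange_one]
    decide)]
  rw [zero_add]
  refine congrArg List.sum (List.map_congr_left ?_)
  intro n _
  rw [pvGetD_map_zero]

-- ===== VERDICT (by name: the statement is the Claim_ definition above) =====
theorem sum_of_results_spec : Claim_equal_sum_of_results := by
  intro init mode _ hpre
  unfold Spec_sum_of_results sum_of_results sum_of_results_alt
  obtain ⟨parsed, dA, hmapM, hA, hrel⟩ :=
    pvFoldRelA (PySem.Chars.splitOn init.toList [',']) PySem.Dict.empty [] hpre pvRelA_init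
  simp only [hA, hmapM]
  by_cases hm : (mode == "part1") = true
  · simp [hm]
  · simp only [Bool.not_eq_true] at hm
    simp only [hm, Bool.false_eq_true, if_false]
    rw [pvSumA dA _ hrel, pvPass1_eq, pvPass2_eq, pvScore_eq, ← pvM_eq]
    rfl
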